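-- pv_equiv track=rewrite | github.com/pggggggggh/blobnom | backend/src/tests/ratings.py | get_color_text
-- ===== SOURCE A (Python) =====
-- colors = {
--     "gray": "\033[90m",
--     "green": "\033[92m",
--     "cyan": "\033[96m",
--     "blue": "\033[94m",
--     "purple": "\033[95m",
--     "orange": "\033[38;5;214m",
--     "red": "\033[91m",
--     "reset": "\033[0m"
-- }
--
-- def get_color_text(ratings):
--     res = ""
--     for rating in ratings:
--         if rating < 1200:
--             color = colors["gray"]
--         elif rating < 1400:
--             color = colors["green"]
--         elif rating < 1600:
--             color = colors["cyan"]
--         elif rating < 1900: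
--             color = colors["blue"]
--         elif rating < 2100:
--             color = colors["purple"]
--         elif rating < 2400:
--             color = colors["orange"]
--         else:
--             color = colors["red"]
--         res += f"{color}{rating}{colors['reset']} "
--     return res
-- ===== SOURCE B (Python) =====
-- import bisect
--
-- colors = {
--     "gray": "\033[90m",
--     "green": "\033[92m",
--     "cyan": "\033[96m",
--     "blue": "\033[94m",
--     "purple": "\033[95m",
--     "orange": "\033[38;5;214m",
--     "red": "\033[91m",
--     "reset": "\033[0m"
-- }
--
-- _THRESHOLDS = [1200, 1400, 1600, 1900, 2100, 2400]
-- _COLOR_ORDER = [colors[name] for name in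
--                 ("gray", "green", "cyan", "blue", "purple", "orange", "red")]
--
-- def get_color_text(ratings):
--     reset = colors["reset"]
--     return "".join(
--         f"{_COLOR_ORDER[bisect.bisect_right(_THRESHOLDS, r)]}{r}{reset} "
--         for r in ratings
--     )
-- ===== Notes on version B (the rewrite author's own statement) =====
-- stated objective: idiomatic
-- what changed: Replaces the 7-way if/elif colour cascade by a threshold table indexed with bisect_right, and builds the result with a generator + ''.join instead of repeated string concatenation.
import Mathlib
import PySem

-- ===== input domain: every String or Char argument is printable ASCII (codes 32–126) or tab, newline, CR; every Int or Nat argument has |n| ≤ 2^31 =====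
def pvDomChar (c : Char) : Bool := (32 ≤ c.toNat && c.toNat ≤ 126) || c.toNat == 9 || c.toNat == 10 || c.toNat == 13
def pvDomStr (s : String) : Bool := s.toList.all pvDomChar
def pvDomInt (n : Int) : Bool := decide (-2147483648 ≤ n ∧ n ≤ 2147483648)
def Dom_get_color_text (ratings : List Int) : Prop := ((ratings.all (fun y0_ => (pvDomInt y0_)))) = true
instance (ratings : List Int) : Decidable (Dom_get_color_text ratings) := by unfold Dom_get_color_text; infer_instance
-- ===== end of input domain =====

-- B replaces the if/elif colour cascade by a threshold table indexed via bisect_right and joins the pieces instead of concatenating.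


-- ===== PORT A =====
-- the colour escape codes (module-level dict `colors` in A); looked up by name as A does
def colorsDict : PySem.Dict String String :=
  PySem.Dict.ofList [("gray", "\x1b[90m"), ("green", "\x1b[92m"), ("cyan", "\x1b[96m"),
   ("blue", "\x1b[94m"), ("purple", "\x1b[95m"), ("orange", "\x1b[38;5;214m"),
   ("red", "\x1b[91m"), ("reset", "\x1b[0m")]

def get_color_text (ratings : List Int) : String :=
  ratings.foldl (fun res rating =>
    let color :=
      if rating < 1200 then PySem.Dict.getD colorsDict "gray" ""
      else if rating < 1400 then PySem.Dict.getD colorsDict "green" ""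
      else if rating < 1600 then PySem.Dict.getD colorsDict "cyan" ""
      else if rating < 1900 then PySem.Dict.getD colorsDict "blue" ""
      else if rating < 2100 then PySem.Dict.getD colorsDict "purple" ""
      else if rating < 2400 then PySem.Dict.getD colorsDict "orange" ""
      else PySem.Dict.getD colorsDict "red" ""
    res ++ (color ++ PySem.Int.toStr rating ++ PySem.Dict.getD colorsDict "reset" "" ++ " ")) ""

-- ===== PORT B =====
def bThresholds : List Int := [1200, 1400, 1600, 1900, 2100, 2400]

def bColorOrder : List String :=
  ["\x1b[90m", "\x1b[92m", "\x1b[96m", "\x1b[94m", "\x1b[95m", "\x1b[38;5;214m", "\x1b[91m"]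

-- bisect.bisect_right on a sorted list = number of elements ≤ r
def bBisectRight (xs : List Int) (r : Int) : Nat := xs.countP (fun t => t ≤ r)

def get_color_text_alt (ratings : List Int) : String :=
  String.join (ratings.map (fun r =>
    (bColorOrder.getD (bBisectRight bThresholds r) "") ++ PySem.Int.toStr r ++ "\x1b[0m" ++ " "))

-- ===== PRECONDITION & SPEC =====
def Spec_get_color_text (ratings : List Int) (out : String) : Prop := out = get_color_text_alt ratings
instance (ratings : List Int) (out : String) : Decidable (Spec_get_color_text ratings out) := by unfold Spec_get_color_text; infer_instance

-- ===== CLAIM (what is proved, stated in full; the proofs are below) =====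
def Claim_equal_get_color_text : Prop := ∀ (ratings : List Int), Dom_get_color_text ratings → Spec_get_color_text ratings (get_color_text ratings)

-- ===== LEMMAS AND PROOFS =====
-- the per-element piece both programs append for one rating
def pieceA (rating : Int) : String :=
  (if rating < 1200 then PySem.Dict.getD colorsDict "gray" ""
   else if rating < 1400 then PySem.Dict.getD colorsDict "green" ""
   else if rating < 1600 then PySem.Dict.getD colorsDict "cyan" ""
   else if rating < 1900 then PySem.Dict.getD colorsDict "blue" ""
   else if rating < 2100 then PySem.Dict.getD colorsDict "purple" ""
   else if rating < 2400 then PySem.Dict.getD colorsDict "orange" ""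
   else PySem.Dict.getD colorsDict "red" "") ++ PySem.Int.toStr rating ++ PySem.Dict.getD colorsDict "reset" "" ++ " "

def pieceB (r : Int) : String :=
  (bColorOrder.getD (bBisectRight bThresholds r) "") ++ PySem.Int.toStr r ++ "\x1b[0m" ++ " "

theorem piece_eq (r : Int) : pieceA r = pieceB r := by
  have g1 : PySem.Dict.getD colorsDict "gray" "" = "\x1b[90m" := rfl
  have g2 : PySem.Dict.getD colorsDict "green" "" = "\x1b[92m" := rfl
  have g3 : PySem.Dict.getD colorsDict "cyan" "" = "\x1b[96m" := rfl
  have g4 : PySem.Dict.getD colorsDict "blue" "" = "\x1b[94m" := rfl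
  have g5 : PySem.Dict.getD colorsDict "purple" "" = "\x1b[95m" := rfl
  have g6 : PySem.Dict.getD colorsDict "orange" "" = "\x1b[38;5;214m" := rfl
  have g7 : PySem.Dict.getD colorsDict "red" "" = "\x1b[91m" := rfl
  have g8 : PySem.Dict.getD colorsDict "reset" "" = "\x1b[0m" := rfl
  unfold pieceA pieceB bBisectRight bThresholds bColorOrder
  simp only [List.countP_cons, List.countP_nil, g1, g2, g3, g4, g5, g6, g7, g8]
  by_cases h1 : r < 1200
  · simp [h1, show ¬(1200 ≤ r) by omega, show ¬(1400 ≤ r) by omega,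
      show ¬(1600 ≤ r) by omega, show ¬(1900 ≤ r) by omega, show ¬(2100 ≤ r) by omega,
      show ¬(2400 ≤ r) by omega]
  · by_cases h2 : r < 1400
    · simp [h1, h2, show (1200 ≤ r) by omega, show ¬(1400 ≤ r) by omega,
        show ¬(1600 ≤ r) by omega, show ¬(1900 ≤ r) by omega, show ¬(2100 ≤ r) by omega,
        show ¬(2400 ≤ r) by omega]
    · by_cases h3 : r < 1600
      · simp [h1, h2, h3, show (1200 ≤ r) by omega, show (1400 ≤ r) by omega,
          show ¬(1600 ≤ r) by omega, show ¬(1900 ≤ r) by omega, show ¬(2100 ≤ r) by omega,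
          show ¬(2400 ≤ r) by omega]
      · by_cases h4 : r < 1900
        · simp [h1, h2, h3, h4, show (1200 ≤ r) by omega,
            show (1400 ≤ r) by omega, show (1600 ≤ r) by omega, show ¬(1900 ≤ r) by omega,
            show ¬(2100 ≤ r) by omega, show ¬(2400 ≤ r) by omega]
        · by_cases h5 : r < 2100
          · simp [h1, h2, h3, h4, h5, show (1200 ≤ r) by omega,
              show (1400 ≤ r) by omega, show (1600 ≤ r) by omega, show (1900 ≤ r) by omega,
              show ¬(2100 ≤ r) by omega, show ¬(2400 ≤ r) by omega]
          · by_cases h6 : r < 2400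
            · simp [h1, h2, h3, h4, h5, h6, show (1200 ≤ r) by omega,
                show (1400 ≤ r) by omega, show (1600 ≤ r) by omega, show (1900 ≤ r) by omega,
                show (2100 ≤ r) by omega, show ¬(2400 ≤ r) by omega]
            · simp [h1, h2, h3, h4, h5, h6, show (1200 ≤ r) by omega,
                show (1400 ≤ r) by omega, show (1600 ≤ r) by omega, show (1900 ≤ r) by omega,
                show (2100 ≤ r) by omega, show (2400 ≤ r) by omega]

theorem foldl_join (l : List Int) : ∀ acc : String,
    l.foldl (fun res rating => res ++ pieceA rating) acc = acc ++ String.join (l.map pieceB) := by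
  induction l with
  | nil => intro acc; simp [String.join]
  | cons x xs ih =>
      intro acc
      simp only [List.foldl_cons, List.map_cons, String.join]
      rw [ih, piece_eq]
      have hj : ∀ (ps : List String) (s : String),
          ps.foldl (· ++ ·) s = s ++ ps.foldl (· ++ ·) "" := by
        intro ps
        induction ps with
        | nil => intro s; simp
        | cons p ps ihp =>
            intro s
            simp only [List.foldl_cons]
            rw [ihp (s ++ p), ihp ("" ++ p)]
            simp [String.append_assoc]
      have hz : ("" : String) ++ pieceB x = pieceB x := by simp
      rw [hz, hj (xs.map pieceB) (pieceB x), String.append_assoc]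
      simp [String.join]

-- ===== VERDICT (by name: the statement is the Claim_ definition above) =====
theorem get_color_text_spec : Claim_equal_get_color_text := by
  intro ratings _
  show get_color_text ratings = get_color_text_alt ratings
  unfold get_color_text get_color_text_alt

  show List.foldl (fun res rating => res ++ pieceA rating) "" ratings = _
  rw [foldl_join ratings ""]
  simp only [String.join]
  congr 1
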